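-- pv_equiv track=rewrite | github.com/ipt-labs/crypto-FB-9 | cp2/Belotskyi_Reznichenko_FB-94/main.py | bloc
-- ===== SOURCE A (Python) =====
-- def bloc(text, length):
--     b = []
--     for j in range(0, length):
--         bb = ""
--         for i in range(0, len(text)-j,length):
--                 bb = bb+text[i+j]
--         if bb!="":
--             b.append(bb)
--         else:
--             continue
--     return b
-- ===== SOURCE B (Python) =====
-- def bloc(text, length):
--     if length <= 0:
--         return []
--     buckets = [""] * length
--     for i, ch in enumerate(text):
--         buckets[i % length] += ch
--     return [s for s in buckets if s]
-- ===== Notes on version B (the rewrite author's own statement) =====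
-- stated objective: alternative
-- what changed: Replaces A's per-column gather (outer loop over columns, inner strided scan re-reading the text once per column) by a single scatter pass that distributes each character into its bucket i % length, then keeps the non-empty buckets.
import Mathlib
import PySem

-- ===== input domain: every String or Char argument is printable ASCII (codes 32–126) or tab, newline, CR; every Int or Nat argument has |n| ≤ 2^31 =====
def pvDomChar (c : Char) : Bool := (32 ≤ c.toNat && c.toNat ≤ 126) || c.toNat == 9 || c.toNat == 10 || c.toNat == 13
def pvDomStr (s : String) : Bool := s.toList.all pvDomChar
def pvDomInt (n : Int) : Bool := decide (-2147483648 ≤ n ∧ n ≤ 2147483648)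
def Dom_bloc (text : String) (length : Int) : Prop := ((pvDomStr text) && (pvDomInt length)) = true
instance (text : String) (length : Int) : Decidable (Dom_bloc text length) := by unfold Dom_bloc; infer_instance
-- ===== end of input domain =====

-- B replaces A's per-column gather (inner strided re-scan of the text for each column) by a
-- single scatter pass into length buckets; same output, no speed claim (objective: alternative).

-- ===== PORT A =====
-- Strings are carried as List Char and re-packed with String.mk (exact for concatenation of
-- single characters); text[i+j] is ported with PySem.List.pyGet?, which is always `some` here
-- because 0 ≤ i < len(text)-j, so the `.elim [] …` default is never taken.
def bloc (text : String) (length : Int) : List String :=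
  (PySem.List.pyRange 0 length 1).foldl (fun b j =>
    let bb := (PySem.List.pyRange 0 ((text.toList.length : Int) - j) length).foldl
      (fun bb i => bb ++ ((PySem.List.pyGet? text.toList (i + j)).elim [] (fun c => [c])))
      ([] : List Char)
    if bb ≠ [] then b ++ [String.mk bb] else b) []

-- ===== PORT B =====
-- Python's enumerate indices are nonnegative and length > 0 past the guard, so Nat indices via
-- List.zipIdx and Nat `%` are exact for Python's i % length here.
def bloc_alt (text : String) (length : Int) : List String :=
  if length ≤ 0 then []
  else
    let L := length.toNat
    let buckets := text.toList.zipIdx.foldl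
      (fun bs p => bs.modify (p.2 % L) (fun s => s ++ [p.1]))
      (List.replicate L ([] : List Char))
    (buckets.filter (fun s => s ≠ [])).map String.mk

-- ===== PRECONDITION & SPEC =====
def Spec_bloc (text : String) (length : Int) (out : List String) : Prop := out = bloc_alt text length
instance (text : String) (length : Int) (out : List String) : Decidable (Spec_bloc text length out) := by unfold Spec_bloc; infer_instance

-- ===== CLAIM (what is proved, stated in full; the proofs are below) =====
def Claim_equal_bloc : Prop := ∀ (text : String) (length : Int), Dom_bloc text length → Spec_bloc text length (bloc text length)

-- ===== LEMMAS AND PROOFS =====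

-- the common reference value: column j of cs with stride L
def colList (cs : List Char) (L j : Nat) : List Char :=
  ((List.range cs.length).filter (fun m => m % L == j)).map (fun m => cs.getD m default)

-- 'if p(x): out.append(f(x))' loop shape, Prop-valued test
theorem foldl_if_append {α β : Type} (p : α → Prop) [DecidablePred p] (f : α → β)
    (l : List α) (acc : List β) :
    l.foldl (fun acc x => if p x then acc ++ [f x] else acc) acc
      = acc ++ (l.filter (fun x => decide (p x))).map f := by
  induction l generalizing acc with
  | nil => simp
  | cons x xs ih =>
    by_cases h : p x <;> simp [List.foldl_cons, h, ih, List.filter_cons]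

theorem flatMap_single {α β : Type} (f : α → β) (l : List α) :
    l.flatMap (fun x => [f x]) = l.map f := by
  induction l with
  | nil => rfl
  | cons x xs ih => simp [List.flatMap_cons, ih]

theorem getD_modify_list {α : Type} (bs : List α) (i j : Nat) (f : α → α) (d : α)
    (h : j < bs.length) :
    (bs.modify i f).getD j d = if i = j then f (bs.getD j d) else bs.getD j d := by
  have h' : j < (bs.modify i f).length := by simpa using h
  rw [List.getD_eq_getElem bs d h, List.getD_eq_getElem _ d h', List.getElem_modify]

theorem scatter_len (L : Nat) (cs : List Char) (s : Nat) (bs : List (List Char)) :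
    ((cs.zipIdx s).foldl (fun bs p => bs.modify (p.2 % L) (fun t => t ++ [p.1])) bs).length
      = bs.length := by
  induction cs generalizing s bs with
  | nil => simp
  | cons c cs ih => simp [List.zipIdx_cons, ih]

theorem scatter_getD (L : Nat) :
    ∀ (cs : List Char) (s : Nat) (bs : List (List Char)), bs.length = L →
    ∀ j, j < L →
    ((cs.zipIdx s).foldl (fun bs p => bs.modify (p.2 % L) (fun t => t ++ [p.1])) bs).getD j []
      = bs.getD j [] ++ ((cs.zipIdx s).filter (fun q => q.2 % L == j)).map Prod.fst := by
  intro cs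
  induction cs with
  | nil => intro s bs _ j _; simp
  | cons c cs ih =>
    intro s bs hbs j hj
    rw [List.zipIdx_cons, List.foldl_cons]
    rw [ih (s + 1) _ (by simpa using hbs) j hj]
    rw [getD_modify_list _ _ _ _ _ (by omega)]
    by_cases h : s % L = j
    · simp [List.filter_cons, h, List.append_assoc]
    · simp [List.filter_cons, h, Ne.symm h]

-- filtering zipIdx by an index predicate = filtering the index range
theorem zipIdx_filter_map (cs : List Char) (p : Nat → Bool) :
    ((cs.zipIdx.filter (fun q => p q.2)).map Prod.fst)
      = ((List.range cs.length).filter p).map (fun m => cs.getD m default) := by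
  induction cs using List.reverseRecOn with
  | nil => simp
  | append_singleton cs c ih =>
    rw [List.zipIdx_append, List.filter_append, List.map_append, ih]
    rw [List.length_append, List.length_singleton, List.range_succ, List.filter_append,
      List.map_append]
    congr 1
    · apply List.map_congr_left
      intro m hm
      have hm' : m < cs.length := List.mem_range.mp (List.mem_of_mem_filter hm)
      rw [List.getD_eq_getElem?_getD, List.getD_eq_getElem?_getD,
        List.getElem?_append_left hm']
    · by_cases h : p cs.length <;>
        simp [List.zipIdx, h, List.getD_eq_getElem?_getD]

-- A's strided index list (shifted by j) = the indices below n congruent to j mod L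
theorem idx_eq (n L j : Nat) (hL : 0 < L) (hj : j < L) :
    (PySem.List.pyRange 0 ((n : Int) - (j : Int)) (L : Int)).map (fun i => i + (j : Int))
      = ((List.range n).filter (fun m => m % L == j)).map (Nat.cast : Nat → Int) := by
  have hLpos : (0 : Int) < (L : Int) := by exact_mod_cast hL
  -- both lists are strictly increasing with the same members
  have pw1 : ((PySem.List.pyRange 0 ((n : Int) - (j : Int)) (L : Int)).map
      (fun i => i + (j : Int))).Pairwise (· < ·) := by
    rw [PySem.List.pyRange_of_pos _ _ hLpos, List.map_map]
    refine List.Pairwise.map _ ?_ List.pairwise_lt_range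
    intro a b hab
    simp only [Function.comp]
    have h1 : (L : Int) * (a : Int) < (L : Int) * (b : Int) := by
      apply mul_lt_mul_of_pos_left _ hLpos; exact_mod_cast hab
    linarith
  have pw2 : (((List.range n).filter (fun m => m % L == j)).map
      (Nat.cast : Nat → Int)).Pairwise (· < ·) := by
    refine List.Pairwise.map _ ?_ (List.Pairwise.filter _ List.pairwise_lt_range)
    intro a b hab; exact_mod_cast hab
  have hmem : ∀ x : Int,
      x ∈ (PySem.List.pyRange 0 ((n : Int) - (j : Int)) (L : Int)).map (fun i => i + (j : Int)) ↔
      x ∈ ((List.range n).filter (fun m => m % L == j)).map (Nat.cast : Nat → Int) := by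
    intro x
    simp only [List.mem_map, PySem.List.mem_pyRange_iff_of_pos hLpos, List.mem_filter,
      List.mem_range, beq_iff_eq]
    constructor
    · rintro ⟨i, ⟨hi0, hin, k, hk⟩, rfl⟩
      simp only [sub_zero] at hk
      have hk0 : (0 : Int) ≤ k := by nlinarith
      have hkc : ((k.toNat : Int)) = k := Int.toNat_of_nonneg hk0
      have hmi : ((L * k.toNat + j : Nat) : Int) = i + j := by push_cast; rw [hkc]; linarith
      refine ⟨L * k.toNat + j, ⟨?_, ?_⟩, hmi⟩
      · omega
      · rw [Nat.mul_add_mod, Nat.mod_eq_of_lt hj]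
    · rintro ⟨m, ⟨hmn, hmod⟩, rfl⟩
      have hjm : j ≤ m := hmod ▸ Nat.mod_le m L
      have hdm : L * (m / L) + j = m := by rw [← hmod]; exact Nat.div_add_mod m L
      have hdm' : (L : Int) * ((m / L : Nat) : Int) + (j : Int) = (m : Int) := by
        exact_mod_cast hdm
      refine ⟨(m : Int) - (j : Int), ⟨by omega, by omega, ⟨((m / L : Nat) : Int), ?_⟩⟩, by ring⟩
      simp only [sub_zero]
      linarith
  have nd1 := pw1.nodup
  have nd2 := pw2.nodup
  have perm := (List.perm_ext_iff_of_nodup nd1 nd2).mpr hmem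
  exact List.eq_of_perm_of_sorted
    (fun a b _ _ h1 h2 => le_antisymm h1 h2)
    (pw1.imp le_of_lt) (pw2.imp le_of_lt) perm

-- A's inner gather loop computes colList
theorem colA_eq (cs : List Char) (L j : Nat) (hL : 0 < L) (hj : j < L) :
    (PySem.List.pyRange 0 ((cs.length : Int) - (j : Int)) (L : Int)).foldl
      (fun bb i => bb ++ ((PySem.List.pyGet? cs (i + (j : Int))).elim [] (fun c => [c])))
      ([] : List Char)
      = colList cs L j := by
  rw [PySem.List.foldl_append_eq_flatMap, List.nil_append]
  have step1 : (PySem.List.pyRange 0 ((cs.length : Int) - (j : Int)) (L : Int)).flatMap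
      (fun i => (PySem.List.pyGet? cs (i + (j : Int))).elim [] (fun c => [c]))
      = ((PySem.List.pyRange 0 ((cs.length : Int) - (j : Int)) (L : Int)).map
          (fun i => i + (j : Int))).flatMap
        (fun i => (PySem.List.pyGet? cs i).elim [] (fun c => [c])) := by
    rw [List.flatMap_map]
  rw [step1, idx_eq cs.length L j hL hj, List.flatMap_map]
  have step2 : ((List.range cs.length).filter (fun m => m % L == j)).flatMap
      (fun m : Nat => (PySem.List.pyGet? cs (m : Int)).elim [] (fun c => [c]))
      = ((List.range cs.length).filter (fun m => m % L == j)).flatMap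
        (fun m => [cs.getD m default]) := by
    apply List.flatMap_congr
    intro m hm
    have hm' : m < cs.length := List.mem_range.mp (List.mem_of_mem_filter hm)
    simp [PySem.List.pyGet?_natCast, List.getElem?_eq_getElem hm',
      List.getD_eq_getElem?_getD]
  rw [step2, flatMap_single]
  rfl

-- ===== VERDICT (by name: the statement is the Claim_ definition above) =====
theorem bloc_spec : Claim_equal_bloc := by
  intro text length _
  unfold Spec_bloc bloc bloc_alt
  by_cases hle : length ≤ 0
  · simp [hle, PySem.List.pyRange_one_eq_nil hle]
  · push_neg at hle
    simp only [if_neg (not_le.mpr hle)]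
    set cs := text.toList with hcs
    set L := length.toNat with hLdef
    have hL : 0 < L := by omega
    have hcast : (L : Int) = length := Int.toNat_of_nonneg (le_of_lt hle)
    -- B's buckets, elementwise, are the columns
    have hblen : (cs.zipIdx.foldl (fun bs p => bs.modify (p.2 % L) (fun s => s ++ [p.1]))
        (List.replicate L ([] : List Char))).length = L := by
      rw [show cs.zipIdx = cs.zipIdx 0 from rfl, scatter_len]; simp
    have hbget : ∀ j, j < L →
        (cs.zipIdx.foldl (fun bs p => bs.modify (p.2 % L) (fun s => s ++ [p.1]))
          (List.replicate L ([] : List Char))).getD j [] = colList cs L j := by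
      intro j hj
      rw [show cs.zipIdx = cs.zipIdx 0 from rfl,
        scatter_getD L cs 0 _ (by simp) j hj]
      simp only [List.getD_eq_getElem?_getD, List.getElem?_replicate]
      rw [if_pos hj]
      simp only [Option.getD_some, List.nil_append]
      exact zipIdx_filter_map cs (fun m => m % L == j)
    have hbuckets : (cs.zipIdx.foldl (fun bs p => bs.modify (p.2 % L) (fun s => s ++ [p.1]))
        (List.replicate L ([] : List Char)))
        = (List.range L).map (fun j => colList cs L j) := by
      apply List.ext_getElem
      · simp [hblen]
      · intro j h1 h2
        have hj : j < L := by simpa [hblen] using h1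
        have h3 := hbget j hj
        rw [List.getD_eq_getElem _ _ h1] at h3
        simpa using h3
    -- A's outer loop: 'if bb != "": b.append(bb)' shape
    rw [foldl_if_append
      (fun j : Int => (PySem.List.pyRange 0 ((cs.length : Int) - j) length).foldl
        (fun bb i => bb ++ ((PySem.List.pyGet? cs (i + j)).elim [] (fun c => [c])))
        ([] : List Char) ≠ [])
      (fun j : Int => String.mk ((PySem.List.pyRange 0 ((cs.length : Int) - j) length).foldl
        (fun bb i => bb ++ ((PySem.List.pyGet? cs (i + j)).elim [] (fun c => [c])))
        ([] : List Char)))]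
    rw [List.nil_append, ← hcast, PySem.List.pyRange_zero_natCast, List.filter_map,
      List.map_map, hbuckets, List.filter_map, List.map_map]
    have hfil : ∀ jN ∈ List.range L,
        ((fun j : Int => decide ((PySem.List.pyRange 0 ((cs.length : Int) - j) ((L : Nat) : Int)).foldl
          (fun bb i => bb ++ ((PySem.List.pyGet? cs (i + j)).elim [] (fun c => [c])))
          ([] : List Char) ≠ [])) ∘ (fun k : Nat => ((k : Int)))) jN
        = ((fun s : List Char => decide (s ≠ [])) ∘ (fun j => colList cs L j)) jN := by
      intro jN hjN
      have hj' : jN < L := List.mem_range.mp hjN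
      simp only [Function.comp]
      rw [colA_eq cs L jN hL hj']
    rw [List.filter_congr hfil]
    apply List.map_congr_left
    intro jN hjN
    have hj' : jN < L := List.mem_range.mp (List.mem_of_mem_filter hjN)
    simp only [Function.comp]
    rw [colA_eq cs L jN hL hj']
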